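-- pv_equiv track=rewrite | github.com/AlgoritmiNarvik/SaMuGeD-Algoritmi-DrDreSamplerAI-2024 | testing_tools/test_scripts/PatternSegmentationwithVisualization.py | find_repeating_patterns
-- ===== SOURCE A (Python) =====
-- from collections import defaultdict
--
-- def find_repeating_patterns(pcps, min_length=2, max_length=8):
--     """Find repeating PCP patterns."""
--     patterns = defaultdict(list)
--     n = len(pcps)
--     for length in range(min_length, min(max_length, n // 2) + 1):
--         for i in range(n - length + 1):
--             pattern = tuple(map(tuple, pcps[i:i+length]))
--             patterns[pattern].append(i)
--     return {k: v for k, v in patterns.items() if len(v) > 1}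
-- ===== SOURCE B (Python) =====
-- def find_repeating_patterns(pcps, min_length=2, max_length=8):
--     """Find repeating PCP patterns by direct window scanning (no hash-map grouping)."""
--     n = len(pcps)
--     out = []
--     for length in range(min_length, min(max_length, n // 2) + 1):
--         for i in range(n - length + 1):
--             window = pcps[i:i+length]
--             if any(pcps[j:j+length] == window for j in range(i)):
--                 continue
--             occs = [j for j in range(n - length + 1) if pcps[j:j+length] == window]
--             if len(occs) > 1:
--                 out.append((tuple(map(tuple, window)), occs))
--     return dict(out)
-- ===== Notes on version B (the rewrite author's own statement) =====
-- stated objective: alternative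
-- what changed: B drops A's defaultdict hash-grouping entirely: for each window it checks by direct comparison whether the same window occurred earlier, and if not collects all its occurrence positions by re-scanning the windows of that length, emitting (pattern, positions) pairs in first-occurrence order.
-- outside the precondition, e.g. on find_repeating_patterns([[1]], -1, 0): A returns {(): [0, 1, 2, 0, 1]}, B returns {(): [0, 1]}
import Mathlib
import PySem

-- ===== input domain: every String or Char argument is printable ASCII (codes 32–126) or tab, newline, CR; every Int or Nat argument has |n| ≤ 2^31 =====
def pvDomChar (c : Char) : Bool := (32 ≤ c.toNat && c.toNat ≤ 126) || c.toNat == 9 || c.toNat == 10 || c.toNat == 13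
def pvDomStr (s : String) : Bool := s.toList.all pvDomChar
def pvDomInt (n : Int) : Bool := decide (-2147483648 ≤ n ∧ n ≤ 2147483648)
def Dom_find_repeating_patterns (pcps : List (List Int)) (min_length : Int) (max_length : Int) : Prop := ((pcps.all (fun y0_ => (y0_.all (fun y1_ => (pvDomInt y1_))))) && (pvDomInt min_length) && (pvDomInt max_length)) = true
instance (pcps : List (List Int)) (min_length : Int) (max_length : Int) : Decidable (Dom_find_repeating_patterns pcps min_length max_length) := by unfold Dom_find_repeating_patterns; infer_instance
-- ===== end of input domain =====

-- B replaces A's defaultdict hash-grouping by direct window re-scanning (alternative algorithm, not faster).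

-- ===== PORT A =====
def find_repeating_patterns (pcps : List (List Int)) (min_length : Int) (max_length : Int) : List (List (List Int) × List Int) :=
  let n : Int := PySem.List.len pcps
  let patterns : PySem.Dict (List (List Int)) (List Int) :=
    (PySem.List.pyRange min_length (min max_length (PySem.Int.floordiv n 2) + 1) 1).foldl
      (fun patterns length =>
        (PySem.List.pyRange 0 (n - length + 1) 1).foldl
          (fun patterns i =>
            let pattern := PySem.List.slice pcps (some i) (some (i + length))
            patterns.modify pattern [] (fun v => v ++ [i]))
          patterns)
      PySem.Dict.empty
  -- final dict comprehension {k: v for k, v in patterns.items() if len(v) > 1}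
  (patterns.items.foldl
    (fun d kv => if PySem.List.len kv.2 > 1 then d.insert kv.1 kv.2 else d)
    PySem.Dict.empty).items

-- ===== PORT B =====
def find_repeating_patterns_alt (pcps : List (List Int)) (min_length : Int) (max_length : Int) : List (List (List Int) × List Int) :=
  let n : Int := PySem.List.len pcps
  let out : List (List (List Int) × List Int) :=
    (PySem.List.pyRange min_length (min max_length (PySem.Int.floordiv n 2) + 1) 1).foldl
      (fun out length =>
        (PySem.List.pyRange 0 (n - length + 1) 1).foldl
          (fun out i =>
            let window := PySem.List.slice pcps (some i) (some (i + length))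
            if (PySem.List.pyRange 0 i 1).any
                (fun j => PySem.List.slice pcps (some j) (some (j + length)) == window) then
              out
            else
              let occs := (PySem.List.pyRange 0 (n - length + 1) 1).filter
                (fun j => PySem.List.slice pcps (some j) (some (j + length)) == window)
              if PySem.List.len occs > 1 then out ++ [(window, occs)] else out)
          out)
      []
  (PySem.Dict.ofList out).items

-- ===== PRECONDITION & SPEC =====
-- Pre_ restricts to the natural domain of nonnegative window lengths (or an empty length range):
-- for min_length < 0 with a nonempty length range, several nonpositive window lengths all slice to
-- the empty pattern and A concatenates their position lists under the single key [] — an artefact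
-- of A's cross-length accumulation that B's per-length scan does not reproduce.
def Pre_find_repeating_patterns (pcps : List (List Int)) (min_length : Int) (max_length : Int) : Prop :=
  0 ≤ min_length ∨ min max_length (PySem.Int.floordiv (PySem.List.len pcps) 2) < min_length
instance (pcps : List (List Int)) (min_length : Int) (max_length : Int) : Decidable (Pre_find_repeating_patterns pcps min_length max_length) := by unfold Pre_find_repeating_patterns; infer_instance
def pvWitness_find_repeating_patterns : List (List Int) × Int × Int := ([[1], [1], [2], [1], [1]], 1, 8)
def Spec_find_repeating_patterns (pcps : List (List Int)) (min_length : Int) (max_length : Int) (out : List (List (List Int) × List Int)) : Prop := out = find_repeating_patterns_alt pcps min_length max_length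
instance (pcps : List (List Int)) (min_length : Int) (max_length : Int) (out : List (List (List Int) × List Int)) : Decidable (Spec_find_repeating_patterns pcps min_length max_length out) := by unfold Spec_find_repeating_patterns; infer_instance

-- ===== CLAIM (what is proved, stated in full; the proofs are below) =====
def Claim_equal_find_repeating_patterns : Prop := ∀ (pcps : List (List Int)) (min_length : Int) (max_length : Int), Dom_find_repeating_patterns pcps min_length max_length → Pre_find_repeating_patterns pcps min_length max_length → Spec_find_repeating_patterns pcps min_length max_length (find_repeating_patterns pcps min_length max_length)

-- ===== LEMMAS AND PROOFS =====

-- the window starting at i, of the given length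
def pvWin (pcps : List (List Int)) (length i : Int) : List (List Int) :=
  PySem.List.slice pcps (some i) (some (i + length))

-- the (pattern, position) pairs one length contributes, in scan order
def pvBlock (pcps : List (List Int)) (n length : Int) : List (List (List Int) × Int) :=
  (PySem.List.pyRange 0 (n - length + 1) 1).map (fun i => (pvWin pcps length i, i))

-- group a pair list by key, first-occurrence order (what A's defaultdict loop produces)
def pvGrp (ps : List (List (List Int) × Int)) : List (List (List Int) × List Int) :=
  (PySem.Set.ofList (ps.map (fun p => p.1))).map
    (fun k => (k, (ps.filter (fun p => p.1 == k)).map (fun p => p.2)))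

theorem pv_filter_flatMap {α β : Type} (l : List α) (f : α → List β) (p : β → Bool) :
    (l.flatMap f).filter p = l.flatMap (fun x => (f x).filter p) := by
  induction l with
  | nil => rfl
  | cons x t ih => simp [List.flatMap_cons, List.filter_append, ih]

theorem pv_foldl_foldl {α β γ : Type} (l : List α) (f : α → List β) (g : γ → β → γ) (init : γ) :
    l.foldl (fun acc x => (f x).foldl g acc) init = (l.flatMap f).foldl g init := by
  induction l generalizing init with
  | nil => rfl
  | cons x t ih => simp [List.flatMap_cons, List.foldl_append, ih]

-- Set.update over elements disjoint from a prefix passes the prefix through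
theorem pv_update_append {α : Type} [BEq α] [LawfulBEq α] (l : List α) (s t : PySem.Set α)
    (h : ∀ x ∈ l, x ∉ s) :
    PySem.Set.update (s ++ t) l = s ++ PySem.Set.update t l := by
  induction l generalizing t with
  | nil => rfl
  | cons x tl ih =>
      have hx : x ∉ s := h x (by simp)
      have hadd : PySem.Set.add (s ++ t) x = s ++ PySem.Set.add t x := by
        simp only [PySem.Set.add, PySem.Set.contains, List.contains_append]
        by_cases hxt : x ∈ t
        · simp [hxt]
        · simp [hxt, hx, List.append_assoc]
      show PySem.Set.update (PySem.Set.add (s ++ t) x) tl = _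
      rw [hadd, ih _ (fun y hy => h y (by simp [hy]))]
      rfl

-- ofList of an append with disjoint parts
theorem pv_ofList_append {α : Type} [BEq α] [LawfulBEq α] (l1 l2 : List α)
    (h : ∀ x ∈ l2, x ∉ l1) :
    PySem.Set.ofList (l1 ++ l2) = PySem.Set.ofList l1 ++ PySem.Set.ofList l2 := by
  have h1 : PySem.Set.ofList (l1 ++ l2) = PySem.Set.update (PySem.Set.ofList l1) l2 := by
    simp [PySem.Set.ofList, PySem.Set.update, List.foldl_append]
  rw [h1, show PySem.Set.ofList l1 = PySem.Set.ofList l1 ++ ([] : List α) by simp,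
    pv_update_append l2 _ _ (fun x hx => by
      simpa [PySem.Set.mem_ofList] using fun hmem => h x hx hmem)]
  simp
  rfl

-- grouping distributes over key-disjoint appends
theorem pv_grp_append (ps qs : List (List (List Int) × Int))
    (h : ∀ p ∈ ps, ∀ q ∈ qs, p.1 ≠ q.1) :
    pvGrp (ps ++ qs) = pvGrp ps ++ pvGrp qs := by
  unfold pvGrp
  rw [List.map_append, pv_ofList_append _ _ (by
    intro x hx hmem
    obtain ⟨q, hq, hq1⟩ := List.mem_map.mp hx
    obtain ⟨p, hp, hp1⟩ := List.mem_map.mp hmem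
    exact h p hp q hq (hp1.trans hq1.symm))]
  rw [List.map_append]
  congr 1
  · apply List.map_congr_left
    intro k hk
    obtain ⟨p, hp, hp1⟩ := List.mem_map.mp ((PySem.Set.mem_ofList _ _).mp hk)
    have : qs.filter (fun p => p.1 == k) = [] := by
      rw [List.filter_eq_nil_iff]
      intro q hq
      simp only [beq_iff_eq]
      exact fun hqk => h p hp q hq (by rw [hp1, ← hqk])
    rw [List.filter_append, this, List.append_nil]
  · apply List.map_congr_left
    intro k hk
    obtain ⟨q, hq, hq1⟩ := List.mem_map.mp ((PySem.Set.mem_ofList _ _).mp hk)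
    have : ps.filter (fun p => p.1 == k) = [] := by
      rw [List.filter_eq_nil_iff]
      intro p hp
      simp only [beq_iff_eq]
      exact fun hpk => h p hp q hq (by rw [hpk, hq1])
    rw [List.filter_append, this, List.nil_append]

-- every key of a block has list-length = length
theorem pv_block_key_len (pcps : List (List Int)) (length : Int) (hL : 0 ≤ length)
    (p : List (List Int) × Int) (hp : p ∈ pvBlock pcps (PySem.List.len pcps) length) :
    (p.1.length : Int) = length := by
  simp only [PySem.List.len_eq] at hp
  obtain ⟨i, hi, rfl⟩ := List.mem_map.mp hp
  rw [PySem.List.mem_pyRange_one] at hi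
  simp only [pvWin, PySem.List.length_slice]
  have h1 : PySem.List.clampIdx pcps.length (i + length) = (i + length).toNat := by
    rw [show (i + length) = ((i + length).toNat : Int) by omega, PySem.List.clampIdx_natCast]
    omega
  have h2 : PySem.List.clampIdx pcps.length i = i.toNat := by
    rw [show i = ((i).toNat : Int) by omega, PySem.List.clampIdx_natCast]
    omega
  rw [h1, h2]
  omega

-- grouping a flatMap of key-disjoint blocks is the flatMap of the groupings
theorem pv_grp_flatMap (pcps : List (List Int)) (ls : List Int) (hnd : ls.Nodup)
    (hnn : ∀ L ∈ ls, 0 ≤ L) :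
    pvGrp (ls.flatMap (fun L => pvBlock pcps (PySem.List.len pcps) L))
      = ls.flatMap (fun L => pvGrp (pvBlock pcps (PySem.List.len pcps) L)) := by
  induction ls with
  | nil => rfl
  | cons L rest ih =>
      rw [List.flatMap_cons, List.flatMap_cons,
        pv_grp_append _ _ (by
          intro p hp q hq
          obtain ⟨L', hL', hq'⟩ := List.mem_flatMap.mp hq
          have h1 : (p.1.length : Int) = L := pv_block_key_len pcps L (hnn L (by simp)) p hp
          have h2 : (q.1.length : Int) = L' := pv_block_key_len pcps L' (hnn L' (by simp [hL'])) q hq'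
          intro heq
          have : L = L' := by rw [← h1, ← h2, heq]
          exact (List.nodup_cons.mp hnd).1 (this ▸ hL')),
        ih (List.nodup_cons.mp hnd).2 (fun L' h => hnn L' (by simp [h]))]

-- first-occurrence scan = map over the deduplicated key list
theorem pv_firstOcc {K V : Type} [BEq K] [LawfulBEq K] (w : Int → K) (occs : K → V) (m : Nat) :
    ((PySem.List.pyRange 0 (m : Int) 1).filter
        (fun i => !((PySem.List.pyRange 0 i 1).any (fun j => w j == w i)))).map
      (fun i => (w i, occs (w i)))
    = (PySem.Set.ofList ((PySem.List.pyRange 0 (m : Int) 1).map w)).map (fun k => (k, occs k)) := by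
  induction m with
  | zero => rfl
  | succ m ih =>
      have hsplit : PySem.List.pyRange 0 ((m : Int) + 1) 1
          = PySem.List.pyRange 0 (m : Int) 1 ++ [(m : Int)] := by
        exact PySem.List.pyRange_one_succ_right (by positivity)
      have hcast : ((m + 1 : Nat) : Int) = (m : Int) + 1 := by push_cast; ring
      rw [hcast, hsplit, List.filter_append, List.map_append, List.map_append]
      have hofl : PySem.Set.ofList (List.map w (PySem.List.pyRange 0 (m : Int) 1) ++ [w (m : Int)])
          = PySem.Set.update (PySem.Set.ofList (List.map w (PySem.List.pyRange 0 (m : Int) 1))) [w (m : Int)] := by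
        simp [PySem.Set.ofList, PySem.Set.update, List.foldl_append]
      simp only [List.map_cons, List.map_nil] at *
      rw [hofl]
      by_cases hmem : w (m : Int) ∈ List.map w (PySem.List.pyRange 0 (m : Int) 1)
      · have hany : ((PySem.List.pyRange 0 (m : Int) 1).any (fun j => w j == w (m : Int))) = true := by
          rw [List.any_eq_true]
          obtain ⟨j, hj, hwj⟩ := List.mem_map.mp hmem
          exact ⟨j, hj, by simp [hwj]⟩
        have hupd : PySem.Set.update (PySem.Set.ofList (List.map w (PySem.List.pyRange 0 (m : Int) 1))) [w (m : Int)]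
            = PySem.Set.ofList (List.map w (PySem.List.pyRange 0 (m : Int) 1)) := by
          simp [PySem.Set.update, PySem.Set.add, PySem.Set.contains,
            (PySem.Set.mem_ofList (List.map w (PySem.List.pyRange 0 (m : Int) 1)) (w (m : Int))).mpr hmem]
        rw [hupd, ← ih]
        simp [hany]
      · have hany : ((PySem.List.pyRange 0 (m : Int) 1).any (fun j => w j == w (m : Int))) = false := by
          rw [List.any_eq_false]
          intro j hj
          simp only [beq_iff_eq]
          exact fun hwj => hmem (List.mem_map.mpr ⟨j, hj, hwj⟩)
        have hupd : PySem.Set.update (PySem.Set.ofList (List.map w (PySem.List.pyRange 0 (m : Int) 1))) [w (m : Int)]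
            = PySem.Set.ofList (List.map w (PySem.List.pyRange 0 (m : Int) 1)) ++ [w (m : Int)] := by
          simp [PySem.Set.update, PySem.Set.add]
          intro x hx1 hx2 heq
          exact hmem (List.mem_map.mpr ⟨x, by rw [PySem.List.mem_pyRange_one]; exact ⟨hx1, hx2⟩, heq⟩)
        rw [hupd, List.map_append, ← ih]
        simp [hany]

-- A's value, in grouped form
theorem pv_A_eq (pcps : List (List Int)) (mi ma : Int) :
    find_repeating_patterns pcps mi ma =
      (PySem.Dict.ofList
        ((pvGrp ((PySem.List.pyRange mi (min ma (PySem.Int.floordiv (PySem.List.len pcps) 2) + 1) 1).flatMap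
            (fun L => pvBlock pcps (PySem.List.len pcps) L))).filter
          (fun kv => decide (PySem.List.len kv.2 > 1)))).items := by
  unfold find_repeating_patterns
  simp only []
  set n := PySem.List.len pcps with hn
  set ls := PySem.List.pyRange mi (min ma (PySem.Int.floordiv n 2) + 1) 1 with hls
  have hinner : ∀ (d : PySem.Dict (List (List Int)) (List Int)) (L : Int),
      (PySem.List.pyRange 0 (n - L + 1) 1).foldl
        (fun patterns i =>
          patterns.modify (PySem.List.slice pcps (some i) (some (i + L))) [] (fun v => v ++ [i])) d
      = (pvBlock pcps n L).foldl (fun d p => d.modify p.1 [] (fun v => v ++ [p.2])) d := by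
    intro d L
    rw [pvBlock, List.foldl_map]
    rfl
  have hD : (ls.foldl
      (fun patterns length =>
        (PySem.List.pyRange 0 (n - length + 1) 1).foldl
          (fun patterns i =>
            patterns.modify (PySem.List.slice pcps (some i) (some (i + length))) [] (fun v => v ++ [i]))
          patterns) PySem.Dict.empty)
      = ((ls.flatMap (fun L => pvBlock pcps n L)).foldl
          (fun d p => d.modify p.1 [] (fun v => v ++ [p.2])) PySem.Dict.empty) := by
    rw [← pv_foldl_foldl]
    simp only [hinner]
  rw [hD]
  set pairs := ls.flatMap (fun L => pvBlock pcps n L) with hpairs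
  set D := pairs.foldl (fun d p => d.modify p.1 [] (fun v => v ++ [p.2])) PySem.Dict.empty with hDdef
  have hkeys : D.keys = PySem.Set.ofList (pairs.map (fun p => p.1)) := by
    rw [hDdef, PySem.Dict.keys_foldl_modify_key pairs (fun p => p.1) [] (fun _ p => (fun v => v ++ [p.2]))]
    simp [PySem.Set.update, PySem.Set.ofList]
  have hnodup : D.keys.Nodup := by
    rw [hDdef]
    exact PySem.Dict.nodup_keys_foldl_modify_key pairs (fun p => p.1) [] _ _ (by simp)
  have hitems : D.items = pvGrp pairs := by
    rw [PySem.Dict.items_eq_map_keys D hnodup [], hkeys, pvGrp]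
    apply List.map_congr_left
    intro k hk
    rw [hDdef, PySem.Dict.getD_foldl_modify_append]
    simp
  rw [hitems]
  have hfin : (pvGrp pairs).foldl
      (fun d kv => if PySem.List.len kv.2 > 1 then d.insert kv.1 kv.2 else d) PySem.Dict.empty
      = ((pvGrp pairs).filter (fun kv => decide (PySem.List.len kv.2 > 1))).foldl
        (fun (d : PySem.Dict (List (List Int)) (List Int)) kv => d.insert kv.1 kv.2) PySem.Dict.empty := by
    rw [List.foldl_filter]
    simp
  rw [hfin]
  rfl

-- pvGrp of a block, in scan-function form
theorem pv_grp_block (pcps : List (List Int)) (n L : Int) :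
    pvGrp (pvBlock pcps n L)
      = (PySem.Set.ofList ((PySem.List.pyRange 0 (n - L + 1) 1).map (pvWin pcps L))).map
          (fun k => (k, (PySem.List.pyRange 0 (n - L + 1) 1).filter (fun j => pvWin pcps L j == k))) := by
  unfold pvGrp pvBlock
  rw [List.map_map]
  apply List.map_congr_left
  intro k hk
  rw [List.filter_map, List.map_map]
  simp [Function.comp_def]

-- one length of B's scan = the filtered grouping of that length's block
theorem pv_B_block (pcps : List (List Int)) (n L : Int) :
    ((PySem.List.pyRange 0 (n - L + 1) 1).filter
        (fun i => !((PySem.List.pyRange 0 i 1).any (fun j => pvWin pcps L j == pvWin pcps L i)) &&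
          decide (PySem.List.len ((PySem.List.pyRange 0 (n - L + 1) 1).filter
            (fun j => pvWin pcps L j == pvWin pcps L i)) > 1))).map
      (fun i => (pvWin pcps L i,
        (PySem.List.pyRange 0 (n - L + 1) 1).filter (fun j => pvWin pcps L j == pvWin pcps L i)))
    = (pvGrp (pvBlock pcps n L)).filter (fun kv => decide (PySem.List.len kv.2 > 1)) := by
  rw [pv_grp_block]
  by_cases hb : n - L + 1 ≤ 0
  · simp [PySem.List.pyRange_one_eq_nil hb, PySem.Set.ofList, PySem.Set.empty]
  · obtain ⟨m, hm⟩ : ∃ m : Nat, n - L + 1 = (m : Int) := ⟨(n - L + 1).toNat, by omega⟩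
    rw [hm]
    rw [← pv_firstOcc (pvWin pcps L)
      (fun k => (PySem.List.pyRange 0 (m : Int) 1).filter (fun j => pvWin pcps L j == k)) m]
    rw [List.filter_map]
    rw [← List.filter_filter, List.filter_comm]
    simp [Function.comp_def]

-- B's value, in grouped form
theorem pv_B_eq (pcps : List (List Int)) (mi ma : Int) :
    find_repeating_patterns_alt pcps mi ma =
      (PySem.Dict.ofList
        ((PySem.List.pyRange mi (min ma (PySem.Int.floordiv (PySem.List.len pcps) 2) + 1) 1).flatMap
          (fun L => (pvGrp (pvBlock pcps (PySem.List.len pcps) L)).filter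
            (fun kv => decide (PySem.List.len kv.2 > 1))))).items := by
  unfold find_repeating_patterns_alt
  simp only []
  set n := PySem.List.len pcps with hn
  set ls := PySem.List.pyRange mi (min ma (PySem.Int.floordiv n 2) + 1) 1 with hls
  have hlam : ∀ (L : Int),
      (fun (out : List (List (List Int) × List Int)) (i : Int) =>
        if (PySem.List.pyRange 0 i 1).any
            (fun j => PySem.List.slice pcps (some j) (some (j + L)) == PySem.List.slice pcps (some i) (some (i + L))) then
          out
        else
          if PySem.List.len ((PySem.List.pyRange 0 (n - L + 1) 1).filter
              (fun j => PySem.List.slice pcps (some j) (some (j + L)) == PySem.List.slice pcps (some i) (some (i + L)))) > 1 then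
            out ++ [(PySem.List.slice pcps (some i) (some (i + L)),
              (PySem.List.pyRange 0 (n - L + 1) 1).filter
                (fun j => PySem.List.slice pcps (some j) (some (j + L)) == PySem.List.slice pcps (some i) (some (i + L))))]
          else out)
      = (fun out i =>
          if (!((PySem.List.pyRange 0 i 1).any (fun j => pvWin pcps L j == pvWin pcps L i)) &&
              decide (PySem.List.len ((PySem.List.pyRange 0 (n - L + 1) 1).filter
                (fun j => pvWin pcps L j == pvWin pcps L i)) > 1)) = true then
            out ++ [(pvWin pcps L i,
              (PySem.List.pyRange 0 (n - L + 1) 1).filter (fun j => pvWin pcps L j == pvWin pcps L i))]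
          else out) := by
    intro L
    funext out i
    simp only [pvWin]
    cases hc : ((PySem.List.pyRange 0 i 1).any
        (fun j => PySem.List.slice pcps (some j) (some (j + L)) == PySem.List.slice pcps (some i) (some (i + L))))
    · simp
    · simp
  have hinner : ∀ (out : List (List (List Int) × List Int)) (L : Int),
      (PySem.List.pyRange 0 (n - L + 1) 1).foldl
        (fun out i =>
          if (PySem.List.pyRange 0 i 1).any
              (fun j => PySem.List.slice pcps (some j) (some (j + L)) == PySem.List.slice pcps (some i) (some (i + L))) then
            out
          else
            if PySem.List.len ((PySem.List.pyRange 0 (n - L + 1) 1).filter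
                (fun j => PySem.List.slice pcps (some j) (some (j + L)) == PySem.List.slice pcps (some i) (some (i + L)))) > 1 then
              out ++ [(PySem.List.slice pcps (some i) (some (i + L)),
                (PySem.List.pyRange 0 (n - L + 1) 1).filter
                  (fun j => PySem.List.slice pcps (some j) (some (j + L)) == PySem.List.slice pcps (some i) (some (i + L))))]
            else out) out
      = out ++ (pvGrp (pvBlock pcps n L)).filter (fun kv => decide (PySem.List.len kv.2 > 1)) := by
    intro out L
    rw [hlam L, PySem.List.foldl_append_if, pv_B_block]
  simp only [hinner]
  rw [PySem.List.foldl_append_eq_flatMap, List.nil_append]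

-- ===== VERDICT (by name: the statement is the Claim_ definition above) =====
theorem find_repeating_patterns_spec : Claim_equal_find_repeating_patterns := by
  intro pcps mi ma _ hpre
  unfold Spec_find_repeating_patterns
  rw [pv_A_eq, pv_B_eq]
  rcases hpre with hpre | hpre
  · rw [pv_grp_flatMap pcps _ (PySem.List.nodup_pyRange_one _ _)
      (fun L hL => le_trans hpre ((PySem.List.mem_pyRange_one).mp hL).1),
      pv_filter_flatMap]
  · rw [PySem.List.pyRange_one_eq_nil (by omega)]
    rfl
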